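-- pv_equiv track=rewrite | github.com/KyongBeom/baekjoon | 프로그래머스/1/12947. 하샤드 수/하샤드 수.py | solution
-- ===== SOURCE A (Python) =====
-- def solution(x):
--     t = str(x)
--     answer = 0
--     for i in t:
--         answer += int(i)
--     if x%answer:
--         return False
--     return True
-- ===== SOURCE B (Python) =====
-- def solution(x):
--     n = x
--     answer = 0
--     while n:
--         answer += n % 10
--         n //= 10
--     if x % answer:
--         return False
--     return True
-- ===== Notes on version B (the rewrite author's own statement) =====
-- stated objective: alternative
-- what changed: Replaces the str(x) conversion and per-character int() parsing with a purely arithmetic digit-extraction loop (n % 10, n //= 10) accumulating the digit sum.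
import Mathlib
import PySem

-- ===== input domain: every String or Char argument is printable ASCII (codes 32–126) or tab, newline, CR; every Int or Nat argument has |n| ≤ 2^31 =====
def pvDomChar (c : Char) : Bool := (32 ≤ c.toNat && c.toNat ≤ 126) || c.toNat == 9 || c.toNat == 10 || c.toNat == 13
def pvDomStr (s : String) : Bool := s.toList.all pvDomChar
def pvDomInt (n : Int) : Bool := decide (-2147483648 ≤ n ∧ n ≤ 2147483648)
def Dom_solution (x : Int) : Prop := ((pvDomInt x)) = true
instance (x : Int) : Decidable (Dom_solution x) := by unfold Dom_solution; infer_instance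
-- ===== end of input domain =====

-- B replaces A's str(x)/int(char) digit summing with an arithmetic n%10, n//=10 loop; same divisibility check.


-- ===== PORT A =====
-- answer += int(i): int of the one-character string; none (ValueError, only reachable
-- on the '-' of a negative x, which Pre_ excludes) is defaulted to 0.
def solution (x : Int) : Bool :=
  let t := PySem.Int.toChars x
  let answer := t.foldl (fun acc c => acc + (PySem.Int.ofChars? [c]).getD 0) 0
  if PySem.Int.mod x answer ≠ 0 then false else true

-- ===== PORT B =====
-- 'while n: answer += n % 10; n //= 10'; the n ≤ 0 guard makes the recursion total
-- (Python B diverges on n < 0, excluded by Pre_; n = 0 is the normal loop exit).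
def solutionLoop (n answer : Int) : Int :=
  if _h : n ≤ 0 then answer
  else solutionLoop (PySem.Int.floordiv n 10) (answer + PySem.Int.mod n 10)
termination_by n.toNat
decreasing_by
  have h10 : (0:Int) < 10 := by omega
  rw [PySem.Int.floordiv_eq_ediv_of_pos h10]
  omega

def solution_alt (x : Int) : Bool :=
  let answer := solutionLoop x 0
  if PySem.Int.mod x answer ≠ 0 then false else true

-- ===== PRECONDITION & SPEC =====
-- Pre_ excludes exactly the inputs where A raises: non-positive x (a zero digit sum
-- gives ZeroDivisionError; a negative x gives ValueError from int of the sign character).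
def Pre_solution (x : Int) : Prop := 1 ≤ x
instance (x : Int) : Decidable (Pre_solution x) := by unfold Pre_solution; infer_instance
def pvWitness_solution : Int := (18)
def Spec_solution (x : Int) (out : Bool) : Prop := out = solution_alt x
instance (x : Int) (out : Bool) : Decidable (Spec_solution x out) := by unfold Spec_solution; infer_instance

-- ===== CLAIM (what is proved, stated in full; the proofs are below) =====
def Claim_equal_solution : Prop := ∀ (x : Int), Dom_solution x → Pre_solution x → Spec_solution x (solution x)

-- ===== LEMMAS AND PROOFS =====

-- value of a digit character as A reads it
lemma charVal_digitChar (r : Nat) (hr : r < 10) :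
    (PySem.Int.ofChars? [Nat.digitChar r]).getD 0 = (r : Int) := by
  interval_cases r <;> decide

-- A's per-character sum over Nat.toDigitsCore equals the arithmetic digit sum
lemma sum_toDigitsCore (fuel : Nat) : ∀ (n : Nat) (ds : List Char), n < fuel →
    ((Nat.toDigitsCore 10 fuel n ds).map
        (fun c => (PySem.Int.ofChars? [c]).getD 0)).sum
      = ((Nat.digits 10 n).sum : Int)
        + ((ds.map (fun c => (PySem.Int.ofChars? [c]).getD 0)).sum) := by
  induction fuel with
  | zero => intro n ds h; omega
  | succ fuel ih =>
    intro n ds h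
    rw [Nat.toDigitsCore]
    by_cases h0 : n / 10 = 0
    · rw [if_pos h0]
      rcases Nat.eq_zero_or_pos n with hn | hn
      · subst hn; simp [charVal_digitChar 0 (by omega)]
      · have hd : Nat.digits 10 n = [n % 10] := by
          rw [Nat.digits_def' (by omega) hn, h0]
          simp
        simp [hd, charVal_digitChar (n % 10) (Nat.mod_lt _ (by omega))]
    · rw [if_neg h0]
      have hn : 0 < n := by omega
      have hlt : n / 10 < fuel := by
        have := Nat.div_lt_self hn (by omega : 1 < 10)
        omega
      rw [ih (n / 10) _ hlt]
      rw [Nat.digits_def' (by omega : 1 < 10) hn]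
      simp [charVal_digitChar (n % 10) (Nat.mod_lt _ (by omega))]
      ring

-- B's loop computes the arithmetic digit sum
lemma solutionLoop_eq (m : Nat) : ∀ (a : Int),
    solutionLoop (m : Int) a = a + ((Nat.digits 10 m).sum : Int) := by
  induction m using Nat.strong_induction_on with
  | _ m ih =>
    intro a
    rcases Nat.eq_zero_or_pos m with hm | hm
    · subst hm; rw [solutionLoop]; simp
    · rw [solutionLoop]
      rw [dif_neg (not_le.mpr (by exact_mod_cast hm))]
      have h1 : PySem.Int.floordiv (m : Int) 10 = ((m / 10 : Nat) : Int) := by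
        exact_mod_cast PySem.Int.floordiv_natCast m 10
      have h2 : PySem.Int.mod (m : Int) 10 = ((m % 10 : Nat) : Int) := by
        exact_mod_cast PySem.Int.mod_natCast m 10
      rw [h1, h2]
      rw [ih (m / 10) (Nat.div_lt_self hm (by omega))]
      rw [Nat.digits_def' (by omega : 1 < 10) hm]
      simp [List.sum_cons]
      ring

-- foldl of addition is the sum of the mapped list
lemma foldl_charSum (l : List Char) :
    l.foldl (fun acc c => acc + (PySem.Int.ofChars? [c]).getD 0) 0
      = (l.map (fun c => (PySem.Int.ofChars? [c]).getD 0)).sum := by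
  rw [List.sum_eq_foldl, List.foldl_map]

-- ===== VERDICT (by name: the statement is the Claim_ definition above) =====
theorem solution_spec : Claim_equal_solution := by
  intro x _hdom hpre
  unfold Spec_solution solution solution_alt
  have hx : ¬ x < 0 := by unfold Pre_solution at hpre; omega
  have hA : PySem.Int.toChars x = Nat.toDigits 10 x.toNat := by
    unfold PySem.Int.toChars
    rw [if_neg hx]
  have hAsum : (Nat.toDigits 10 x.toNat).foldl
      (fun acc c => acc + (PySem.Int.ofChars? [c]).getD 0) 0
      = ((Nat.digits 10 x.toNat).sum : Int) := by
    unfold Nat.toDigits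
    rw [foldl_charSum, sum_toDigitsCore (x.toNat + 1) x.toNat [] (by omega)]
    simp
  have hBsum : solutionLoop x 0 = ((Nat.digits 10 x.toNat).sum : Int) := by
    have h := solutionLoop_eq x.toNat 0
    have hxn : ((x.toNat : Int)) = x := by omega
    rw [hxn] at h
    rw [h]; ring
  simp only [hA, hAsum, hBsum]
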